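-- pv_equiv track=rewrite | github.com/pypi-data/pypi-mirror-395 | packages/uniqseq/uniqseq-0.2.0.tar.gz/uniqseq-0.2.0/optimization/profile_uniqseq.py | generate_test_data
-- ===== SOURCE A (Python) =====
-- def generate_test_data(num_lines: int, pattern_length: int = 100, num_repeats: int = 10):
--     """Generate test data with repeating patterns.
--
--     Args:
--         num_lines: Total number of lines to generate
--         pattern_length: Length of each repeating pattern
--         num_repeats: How many times each pattern repeats
--     """
--     lines = []
--     pattern_id = 0
--
--     while len(lines) < num_lines:
--         # Generate a pattern
--         pattern = []
--         for i in range(pattern_length):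
--             pattern.append(f"Line {pattern_id}:{i} - Some content here with data")
--
--         # Repeat the pattern
--         for _ in range(num_repeats):
--             lines.extend(pattern)
--             if len(lines) >= num_lines:
--                 break
--
--         pattern_id += 1
--
--     return lines[:num_lines]
-- ===== SOURCE B (Python) =====
-- def generate_test_data(num_lines: int, pattern_length: int = 100, num_repeats: int = 10):
--     """Generate test data with repeating patterns (closed form per line index)."""
--     block = pattern_length * num_repeats
--     return [
--         f"Line {n // block}:{(n % block) % pattern_length} - Some content here with data"
--         for n in range(num_lines)
--     ]
-- ===== Notes on version B (the rewrite author's own statement) =====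
-- stated objective: simpler
-- what changed: Replaced the while-loop that builds each pattern, repeatedly extends a buffer with early break and truncates at the end by a single comprehension that computes every line directly from its global index via divmod arithmetic (pattern_id = n // (pattern_length*num_repeats), i = (n % block) % pattern_length).
import Mathlib
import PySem

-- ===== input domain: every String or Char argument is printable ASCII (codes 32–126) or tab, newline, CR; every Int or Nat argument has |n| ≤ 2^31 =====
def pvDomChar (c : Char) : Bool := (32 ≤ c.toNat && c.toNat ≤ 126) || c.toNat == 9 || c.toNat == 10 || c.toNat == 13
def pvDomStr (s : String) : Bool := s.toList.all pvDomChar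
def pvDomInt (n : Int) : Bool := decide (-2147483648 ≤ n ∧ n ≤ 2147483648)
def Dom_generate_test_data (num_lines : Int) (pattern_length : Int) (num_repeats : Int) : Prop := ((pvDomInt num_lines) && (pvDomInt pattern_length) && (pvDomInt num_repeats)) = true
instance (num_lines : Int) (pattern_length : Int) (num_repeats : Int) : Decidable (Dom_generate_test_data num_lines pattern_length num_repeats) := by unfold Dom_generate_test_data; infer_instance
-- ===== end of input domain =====

-- B computes each line in closed form from its global index (one pass, no pattern buffer
-- or repeated extend/truncate); equivalence is claimed on the inputs where A terminates.

-- ===== PORT A =====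
-- the inner 'for _ in range(num_repeats): lines.extend(pattern); if len(lines) >= num_lines: break'
def gtdRepeat (num_lines : Int) (pattern : List String) : Nat → List String → List String
  | 0, lines => lines
  | k+1, lines =>
    -- lines.extend(pattern); if len(lines) >= num_lines: break   (lines ++ pattern written inline)
    if num_lines ≤ ((lines ++ pattern).length : Int) then lines ++ pattern
    else gtdRepeat num_lines pattern k (lines ++ pattern)

-- the outer 'while len(lines) < num_lines' loop; fuel makes it total (each iteration adds
-- at least one line whenever A terminates, so num_lines.toNat + 1 steps always suffice)
def gtdLoop (num_lines pattern_length num_repeats : Int) : Nat → List String → Int → List String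
  | 0, lines, _ => lines
  | fuel+1, lines, pattern_id =>
    if (lines.length : Int) < num_lines then
      -- pattern = [f"Line {pattern_id}:{i} ..." for i in range(pattern_length)], used once below
      gtdLoop num_lines pattern_length num_repeats fuel
        (gtdRepeat num_lines
          ((PySem.List.pyRange 0 pattern_length 1).map
            (fun i => "Line " ++ PySem.Int.toStr pattern_id ++ ":" ++ PySem.Int.toStr i
                      ++ " - Some content here with data"))
          num_repeats.toNat lines) (pattern_id + 1)
    else lines

def generate_test_data (num_lines : Int) (pattern_length : Int) (num_repeats : Int) : List String :=
  PySem.List.slice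
    (gtdLoop num_lines pattern_length num_repeats (num_lines.toNat + 1) [] 0)
    none (some num_lines)

-- ===== PORT B =====
def generate_test_data_alt (num_lines : Int) (pattern_length : Int) (num_repeats : Int) : List String :=
  let block := pattern_length * num_repeats
  (PySem.List.pyRange 0 num_lines 1).map (fun n =>
    "Line " ++ PySem.Int.toStr (PySem.Int.floordiv n block) ++ ":"
      ++ PySem.Int.toStr (PySem.Int.mod (PySem.Int.mod n block) pattern_length)
      ++ " - Some content here with data")

-- ===== PRECONDITION & SPEC =====
-- Pre_ excludes exactly the inputs on which A never returns (num_lines > 0 with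
-- pattern_length ≤ 0 or num_repeats ≤ 0 makes A's while loop run forever).
def Pre_generate_test_data (num_lines : Int) (pattern_length : Int) (num_repeats : Int) : Prop :=
  num_lines ≤ 0 ∨ (0 < pattern_length ∧ 0 < num_repeats)
instance (num_lines : Int) (pattern_length : Int) (num_repeats : Int) : Decidable (Pre_generate_test_data num_lines pattern_length num_repeats) := by unfold Pre_generate_test_data; infer_instance

def pvWitness_generate_test_data : Int × Int × Int := (7, 2, 3)

def Spec_generate_test_data (num_lines : Int) (pattern_length : Int) (num_repeats : Int) (out : List String) : Prop := out = generate_test_data_alt num_lines pattern_length num_repeats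
instance (num_lines : Int) (pattern_length : Int) (num_repeats : Int) (out : List String) : Decidable (Spec_generate_test_data num_lines pattern_length num_repeats out) := by unfold Spec_generate_test_data; infer_instance

-- ===== CLAIM (what is proved, stated in full; the proofs are below) =====
def Claim_equal_generate_test_data : Prop := ∀ (num_lines : Int) (pattern_length : Int) (num_repeats : Int), Dom_generate_test_data num_lines pattern_length num_repeats → Pre_generate_test_data num_lines pattern_length num_repeats → Spec_generate_test_data num_lines pattern_length num_repeats (generate_test_data num_lines pattern_length num_repeats)

-- ===== LEMMAS AND PROOFS =====

-- the line B produces at global index n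
def idealLine (pattern_length num_repeats : Int) (n : Int) : String :=
  "Line " ++ PySem.Int.toStr (PySem.Int.floordiv n (pattern_length * num_repeats)) ++ ":"
    ++ PySem.Int.toStr (PySem.Int.mod (PySem.Int.mod n (pattern_length * num_repeats)) pattern_length)
    ++ " - Some content here with data"

theorem alt_eq_map (num_lines pattern_length num_repeats : Int) :
    generate_test_data_alt num_lines pattern_length num_repeats
      = (PySem.List.pyRange 0 num_lines 1).map (idealLine pattern_length num_repeats) := rfl

-- A's pattern for a given pattern_id equals the ideal lines of the chunk it will occupy
theorem pattern_eq_chunk (P R pid j : Int) (hP : 0 < P) (hR : 0 < R)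
    (_hpid : 0 ≤ pid) (hj : 0 ≤ j) (hjR : j < R) :
    (PySem.List.pyRange 0 P 1).map
      (fun i => "Line " ++ PySem.Int.toStr pid ++ ":" ++ PySem.Int.toStr i
                ++ " - Some content here with data")
      = (PySem.List.pyRange (pid * (P * R) + j * P) (pid * (P * R) + j * P + P) 1).map
          (idealLine P R) := by
  rw [PySem.List.pyRange_one 0 P, PySem.List.pyRange_one (pid * (P * R) + j * P)]
  simp only [List.map_map, add_sub_cancel_left, sub_zero]
  apply List.map_congr_left
  intro k hk
  have hk' : (k : Int) < P := by
    have := List.mem_range.mp hk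
    omega
  have hk0 : (0:Int) ≤ (k : Int) := Int.natCast_nonneg k
  have hblock : (0:Int) < P * R := mul_pos hP hR
  have hjP : j * P ≤ (R - 1) * P := mul_le_mul_of_nonneg_right (by omega) (le_of_lt hP)
  have hdiv : PySem.Int.floordiv (pid * (P * R) + j * P + (k:Int)) (P * R) = pid := by
    rw [PySem.Int.floordiv_eq_iff_of_pos hblock]
    constructor <;> nlinarith
  have hmod : PySem.Int.mod (PySem.Int.mod (pid * (P * R) + j * P + (k:Int)) (P * R)) P
      = (k:Int) := by
    rw [PySem.Int.mod_eq_emod_of_pos hblock]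
    have e1 : pid * (P * R) + j * P + (k:Int) = (j * P + k) + (P * R) * pid := by ring
    rw [e1, Int.add_mul_emod_self_left,
        Int.emod_eq_of_lt (by positivity) (by nlinarith)]
    rw [PySem.Int.mod_eq_emod_of_pos hP]
    have e2 : j * P + (k:Int) = (k:Int) + P * j := by ring
    rw [e2, Int.add_mul_emod_self_left, Int.emod_eq_of_lt hk0 hk']
  simp only [Function.comp, idealLine, zero_add]
  rw [hdiv, hmod]

-- lines ++ pattern-chunk extends an ideal prefix by one pattern length
theorem append_chunk (P R a : Int) (h0 : 0 ≤ a) (hP : 0 ≤ P) :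
    (PySem.List.pyRange 0 a 1).map (idealLine P R)
      ++ (PySem.List.pyRange a (a + P) 1).map (idealLine P R)
      = (PySem.List.pyRange 0 (a + P) 1).map (idealLine P R) := by
  rw [← List.map_append, ← PySem.List.pyRange_one_append 0 a (a + P) h0 (by omega)]

theorem length_ideal_prefix (P R a : Int) :
    (((PySem.List.pyRange 0 a 1).map (idealLine P R)).length : Int) = max a 0 := by
  simp [PySem.List.length_pyRange_one]

-- the repeat loop keeps the ideal-prefix invariant
theorem gtdRepeat_corr (N P R pid : Int) (hP : 0 < P) (hR : 0 < R) (hpid : 0 ≤ pid) :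
    ∀ (k : Nat) (j : Int), 0 ≤ j → j + (k : Int) = R →
    ∃ m : Int, pid * (P * R) + j * P ≤ m ∧
      (0 < k → pid * (P * R) + j * P + P ≤ m) ∧
      (N ≤ m ∨ m = (pid + 1) * (P * R)) ∧
      gtdRepeat N
        ((PySem.List.pyRange 0 P 1).map
          (fun i => "Line " ++ PySem.Int.toStr pid ++ ":" ++ PySem.Int.toStr i
                    ++ " - Some content here with data"))
        k ((PySem.List.pyRange 0 (pid * (P * R) + j * P) 1).map (idealLine P R))
      = (PySem.List.pyRange 0 m 1).map (idealLine P R) := by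
  intro k
  induction k with
  | zero =>
    intro j hj hjk
    refine ⟨pid * (P * R) + j * P, le_refl _, by omega, ?_, rfl⟩
    right
    have : j = R := by push_cast at hjk; omega
    subst this
    ring
  | succ k ih =>
    intro j hj hjk
    have hkc : (0:Int) ≤ (k:Int) := Int.natCast_nonneg k
    have hjR : j < R := by push_cast at hjk; omega
    have ha : (0:Int) ≤ pid * (P * R) + j * P := by positivity
    have happ : (PySem.List.pyRange 0 (pid * (P * R) + j * P) 1).map (idealLine P R)
        ++ (PySem.List.pyRange 0 P 1).map
            (fun i => "Line " ++ PySem.Int.toStr pid ++ ":" ++ PySem.Int.toStr i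
                      ++ " - Some content here with data")
        = (PySem.List.pyRange 0 (pid * (P * R) + j * P + P) 1).map (idealLine P R) := by
      rw [pattern_eq_chunk P R pid j hP hR (by omega) hj hjR]
      exact append_chunk P R _ ha (le_of_lt hP)
    have hlen : ((((PySem.List.pyRange 0 (pid * (P * R) + j * P + P) 1).map
        (idealLine P R))).length : Int) = pid * (P * R) + j * P + P := by
      rw [length_ideal_prefix]; omega
    rw [gtdRepeat, happ]
    by_cases hstop :
        N ≤ ((((PySem.List.pyRange 0 (pid * (P * R) + j * P + P) 1).map
          (idealLine P R))).length : Int)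
    · rw [if_pos hstop]
      rw [hlen] at hstop
      exact ⟨pid * (P * R) + j * P + P, by omega, fun _ => le_refl _, Or.inl hstop, rfl⟩
    · rw [if_neg hstop]
      have e : pid * (P * R) + j * P + P = pid * (P * R) + (j + 1) * P := by ring
      rw [e]
      obtain ⟨m, h1, h2, h3, h4⟩ := ih (j + 1) (by omega) (by push_cast at hjk ⊢; omega)
      have e2 : (j + 1) * P = j * P + P := by ring
      exact ⟨m, by omega, fun _ => by omega, h3, h4⟩

-- if the buffer is already long enough, the while loop returns it unchanged
theorem gtdLoop_stop (N P R : Int) (fuel : Nat) (lines : List String) (pid : Int)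
    (h : ¬ (lines.length : Int) < N) :
    gtdLoop N P R fuel lines pid = lines := by
  cases fuel with
  | zero => rfl
  | succ fuel => rw [gtdLoop, if_neg h]

-- the while loop turns an ideal prefix of a whole number of blocks into an ideal prefix
-- of length at least N, given enough fuel
theorem gtdLoop_corr (N P R : Int) (hP : 0 < P) (hR : 0 < R) :
    ∀ (fuel : Nat) (pid : Int), 0 ≤ pid → N ≤ pid * (P * R) + fuel →
    ∃ m : Int, N ≤ m ∧
      gtdLoop N P R fuel ((PySem.List.pyRange 0 (pid * (P * R)) 1).map (idealLine P R)) pid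
        = (PySem.List.pyRange 0 m 1).map (idealLine P R) := by
  intro fuel
  induction fuel with
  | zero =>
    intro pid hpid hfuel
    refine ⟨pid * (P * R), by push_cast at hfuel; omega, rfl⟩
  | succ fuel ih =>
    intro pid hpid hfuel
    have hblock : (0:Int) < P * R := mul_pos hP hR
    have ha : (0:Int) ≤ pid * (P * R) := by positivity
    have hlen : ((((PySem.List.pyRange 0 (pid * (P * R)) 1).map (idealLine P R))).length : Int)
        = pid * (P * R) := by rw [length_ideal_prefix]; omega
    by_cases hc : ((((PySem.List.pyRange 0 (pid * (P * R)) 1).map (idealLine P R))).length : Int) < N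
    · rw [gtdLoop, if_pos hc]
      rw [hlen] at hc
      obtain ⟨m, h1, h2, h3, h4⟩ :=
        gtdRepeat_corr N P R pid hP hR hpid R.toNat 0 (le_refl 0) (by omega)
      rw [show pid * (P * R) = pid * (P * R) + 0 * P from by ring, h4]
      rcases h3 with hNm | hm
      · refine ⟨m, hNm, ?_⟩
        apply gtdLoop_stop
        rw [length_ideal_prefix]
        omega
      · subst hm
        have e : (pid + 1) * (P * R) = pid * (P * R) + P * R := by ring
        obtain ⟨m', hm1, hm2⟩ := ih (pid + 1) (by omega)
          (by push_cast at hfuel ⊢; omega)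
        exact ⟨m', hm1, hm2⟩
    · rw [gtdLoop, if_neg hc]
      rw [hlen] at hc
      exact ⟨pid * (P * R), by omega, rfl⟩

-- taking the first N lines of a long-enough ideal prefix gives B's list
theorem slice_ideal (P R N m : Int) (h0 : 0 ≤ N) (hNm : N ≤ m) :
    PySem.List.slice ((PySem.List.pyRange 0 m 1).map (idealLine P R)) none (some N)
      = (PySem.List.pyRange 0 N 1).map (idealLine P R) := by
  have eN : N = ((N.toNat : Nat) : Int) := by omega
  rw [eN, PySem.List.slice_to_natCast, PySem.List.pyRange_one_append 0 N m h0 hNm,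
      List.map_append, ← eN]
  have hlen : (((PySem.List.pyRange 0 N 1).map (idealLine P R))).length = N.toNat := by
    simp [PySem.List.length_pyRange_one]
  rw [List.take_append_of_le_length (by omega), List.take_of_length_le (by omega)]

-- ===== VERDICT (by name: the statement is the Claim_ definition above) =====
theorem generate_test_data_spec : Claim_equal_generate_test_data := by
  intro N P R _hDom hPre
  unfold Spec_generate_test_data
  rw [alt_eq_map]
  by_cases hN : N ≤ 0
  · unfold generate_test_data
    rw [gtdLoop_stop N P R _ [] 0 (by simp; omega)]
    rw [PySem.List.pyRange_one_eq_nil hN]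
    simp [PySem.List.slice]
  · have hPR : 0 < P ∧ 0 < R := by
      rcases hPre with h | h
      · omega
      · exact h
    obtain ⟨hP, hR⟩ := hPR
    unfold generate_test_data
    have e0 : ([] : List String)
        = (PySem.List.pyRange 0 ((0:Int) * (P * R)) 1).map (idealLine P R) := by
      rw [show (0:Int) * (P * R) = 0 from by ring,
          PySem.List.pyRange_one_eq_nil (le_refl 0)]
      rfl
    rw [e0]
    obtain ⟨m, hm1, hm2⟩ :=
      gtdLoop_corr N P R hP hR (N.toNat + 1) 0 (le_refl 0) (by push_cast; omega)
    rw [hm2, slice_ideal P R N m (by omega) hm1]
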